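-- pv_equiv track=rewrite | github.com/edt-yxz-zzd/python3_src | seed/str_tools/iter_split_ex_by_.py | iter_split_ex_by_
-- ===== SOURCE A (Python) =====
-- def iter_split_ex_by_(substr, s, /):
--     '-> Iter (gap, smay substr)  # str | bytes'
--     if not len(substr): raise ValueError
--     L = len(substr)
--     i = 0
--     while 1:
--         j = s.find(substr, i)
--         if j == -1:break
--         gap = s[i:j]
--         yield gap, substr
--         i = j+L
--     gap = s[i:]
--     yield gap, substr[:0]
--     return
-- ===== SOURCE B (Python) =====
-- def iter_split_ex_by_(substr, s, /):
--     '-> Iter (gap, smay substr)  # str | bytes'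
--     if not len(substr): raise ValueError
--     pieces = s.split(substr)
--     for gap in pieces[:-1]:
--         yield gap, substr
--     yield pieces[-1], substr[:0]
-- ===== Notes on version B (the rewrite author's own statement) =====
-- stated objective: idiomatic
-- what changed: replaces the manual find/slice while-loop with a single built-in s.split(substr) and a for-loop over the materialized pieces (the lazy ValueError guard for an empty separator is kept)
import Mathlib
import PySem

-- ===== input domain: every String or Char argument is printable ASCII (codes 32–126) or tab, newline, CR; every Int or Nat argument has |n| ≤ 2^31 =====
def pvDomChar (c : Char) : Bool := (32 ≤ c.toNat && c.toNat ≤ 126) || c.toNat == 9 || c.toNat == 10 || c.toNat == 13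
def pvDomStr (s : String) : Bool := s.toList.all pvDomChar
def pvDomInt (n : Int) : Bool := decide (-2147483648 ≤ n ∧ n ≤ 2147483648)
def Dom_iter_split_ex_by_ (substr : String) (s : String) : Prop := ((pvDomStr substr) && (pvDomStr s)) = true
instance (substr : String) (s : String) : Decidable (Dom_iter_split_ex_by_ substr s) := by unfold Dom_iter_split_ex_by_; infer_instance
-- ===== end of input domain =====

-- B replaces A's manual find/slice while-loop by one built-in split plus a loop over the pieces (idiomatic, same cost).


-- ===== PORT A =====
-- the while-loop: state is i; fuel s.length+1 strictly bounds the number of iterations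
-- (each iteration moves i forward by at least 1 and i never exceeds s.length), so the
-- fuel-0 branch is unreachable — it only makes the recursion total.
def iterSplitLoopA (substr s : String) (L : Nat) (fuel : Nat) (i : Nat) : List (String × String) :=
  match fuel with
  | 0 => []
  | fuel + 1 =>
    let j := PySem.Str.findFrom s substr (i : Int)      -- j = s.find(substr, i)
    if j = -1 then
      -- break; gap = s[i:]; yield gap, substr[:0]
      [(PySem.Str.slice s (some (i : Int)) none, PySem.Str.slice substr none (some 0))]
    else
      -- gap = s[i:j]; yield gap, substr; i = j + L
      (PySem.Str.slice s (some (i : Int)) (some j), substr) :: iterSplitLoopA substr s L fuel (j.toNat + L)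

def iter_split_ex_by_ (substr : String) (s : String) : List (String × String) :=
  if PySem.Str.len substr = 0 then []                   -- 'if not len(substr): raise ValueError' — outside Pre_
  else iterSplitLoopA substr s (PySem.Str.len substr).toNat (s.toList.length + 1) 0

-- ===== PORT B =====
def iter_split_ex_by__alt (substr : String) (s : String) : List (String × String) :=
  if PySem.Str.len substr = 0 then []                   -- 'if not len(substr): raise ValueError' — outside Pre_
  else
    match PySem.Str.split? s substr with                -- pieces = s.split(substr); some since substr ≠ ''
    | none => []
    | some pieces =>
        ((PySem.List.slice pieces none (some (-1))).map (fun gap => (gap, substr)))   -- for gap in pieces[:-1]: yield gap, substr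
        ++ [(((PySem.List.pyGet? pieces (-1)).getD ""), PySem.Str.slice substr none (some 0))]  -- yield pieces[-1], substr[:0]  (pieces is never empty)

-- ===== PRECONDITION & SPEC =====
-- Pre_ excludes exactly the empty separator, on which the Python A (and B) raises ValueError.
def Pre_iter_split_ex_by_ (substr : String) (s : String) : Prop := substr ≠ ""
instance (substr : String) (s : String) : Decidable (Pre_iter_split_ex_by_ substr s) := by unfold Pre_iter_split_ex_by_; infer_instance
def pvWitness_iter_split_ex_by_ : String × String := ("an", "banana")

def Spec_iter_split_ex_by_ (substr : String) (s : String) (out : List (String × String)) : Prop := out = iter_split_ex_by__alt substr s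
instance (substr : String) (s : String) (out : List (String × String)) : Decidable (Spec_iter_split_ex_by_ substr s out) := by unfold Spec_iter_split_ex_by_; infer_instance

-- ===== CLAIM (what is proved, stated in full; the proofs are below) =====
def Claim_equal_iter_split_ex_by_ : Prop := ∀ (substr : String) (s : String), Dom_iter_split_ex_by_ substr s → Pre_iter_split_ex_by_ substr s → Spec_iter_split_ex_by_ substr s (iter_split_ex_by_ substr s)

-- ===== LEMMAS AND PROOFS =====

-- mathematical splitter: character-by-character, mirrors splitOn.go without fuel/accumulators
def spChar (sep : List Char) : List Char → List (List Char)
  | [] => [[]]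
  | c :: rest =>
    if sep.isPrefixOf (c :: rest) then [] :: spChar sep (rest.drop (sep.length - 1))
    else (spChar sep rest).modifyHead (c :: ·)
termination_by l => l.length
decreasing_by
  all_goals first | (simp; omega) | simp

theorem spChar_ne_nil (sep l : List Char) : spChar sep l ≠ [] := by
  induction l using spChar.induct sep with
  | case1 => simp [spChar]
  | case2 c rest h ih => simp [spChar, h]
  | case3 c rest h ih =>
    simp only [spChar, h]
    cases hs : spChar sep rest with
    | nil => exact absurd hs ih
    | cons a t => simp

theorem go_eq_spChar (sep : List Char) (hsep : sep ≠ []) (fuel : Nat) :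
    ∀ (l cur : List Char) (acc : List (List Char)), l.length < fuel →
      PySem.Chars.splitOn.go sep fuel l cur acc
        = acc.reverse ++ (spChar sep l).modifyHead (cur.reverse ++ ·) := by
  induction fuel with
  | zero => intro l cur acc h; omega
  | succ fuel ih =>
    intro l cur acc h
    cases l with
    | nil =>
      rw [PySem.Chars.splitOn.go.eq_def]
      simp [spChar]
    | cons c rest =>
      rw [PySem.Chars.splitOn.go.eq_def]
      simp only []
      by_cases hp : sep.isPrefixOf (c :: rest) = true
      · rw [if_pos hp]
        have hL : 1 ≤ sep.length := by cases sep <;> simp_all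
        rw [ih _ _ _ (by simp at h ⊢; omega)]
        have hd : List.drop sep.length (c :: rest) = rest.drop (sep.length - 1) := by
          cases hL' : sep.length with
          | zero => omega
          | succ k => simp [List.drop_succ_cons]
        rw [hd]
        simp only [spChar, hp, if_pos]
        cases hs : spChar sep (rest.drop (sep.length - 1)) with
        | nil => exact absurd hs (spChar_ne_nil _ _)
        | cons a t => simp
      · rw [if_neg hp]
        rw [ih _ _ _ (by simp at h ⊢; omega)]
        simp only [spChar, hp]
        cases hs : spChar sep rest with
        | nil => exact absurd hs (spChar_ne_nil _ _)
        | cons a t => simp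

theorem splitOn_eq_spChar (sep l : List Char) (hsep : sep ≠ []) :
    PySem.Chars.splitOn l sep = spChar sep l := by
  unfold PySem.Chars.splitOn
  rw [go_eq_spChar sep hsep _ l [] [] (by omega)]
  cases hs : spChar sep l with
  | nil => exact absurd hs (spChar_ne_nil _ _)
  | cons a t => simp

theorem spChar_of_find_neg (sep : List Char) :
    ∀ l : List Char, PySem.Chars.find l sep = -1 → spChar sep l = [l] := by
  intro l
  induction l using spChar.induct sep with
  | case1 => intro h; simp [spChar]
  | case2 c rest h ih =>
    intro hf
    exact absurd ((PySem.Chars.find_ne_neg_one_iff _ _).mpr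
      ((List.isPrefixOf_iff_prefix.mp h).isInfix)) (by simp [hf])
  | case3 c rest h ih =>
    intro hf
    have hni : ¬ sep <:+: (c :: rest) := (PySem.Chars.find_eq_neg_one_iff _ _).mp hf
    have hr : PySem.Chars.find rest sep = -1 := by
      rw [PySem.Chars.find_eq_neg_one_iff]
      intro hi; exact hni (hi.trans (List.infix_cons (List.infix_refl rest)))
    rw [spChar]; rw [if_neg h, ih hr]; rfl

theorem find_nonneg_exists (sep rest : List Char) (j : Nat) (hp : sep <+: rest.drop j) :
    0 ≤ PySem.Chars.find rest sep := by
  rw [PySem.Chars.find_nonneg_iff]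
  rw [← PySem.Chars.isIn_iff_infix, ← PySem.Chars.exists_prefix_drop_iff_isIn]
  exact ⟨j, hp⟩

theorem find_cons_succ (sep : List Char) (c : Char) (rest : List Char) (j : Nat)
    (h : PySem.Chars.find (c :: rest) sep = (j : Int) + 1) :
    PySem.Chars.find rest sep = (j : Int) := by
  have h0 : (0:Int) ≤ PySem.Chars.find (c::rest) sep := by rw [h]; omega
  obtain ⟨hpre, hmin⟩ := PySem.Chars.find_spec h0
  rw [h] at hpre hmin
  have ht : ((j : Int) + 1).toNat = j + 1 := by omega
  rw [ht] at hpre hmin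
  rw [List.drop_succ_cons] at hpre
  have h0' : 0 ≤ PySem.Chars.find rest sep := find_nonneg_exists sep rest j hpre
  obtain ⟨hpre', hmin'⟩ := PySem.Chars.find_spec h0'
  set j' := (PySem.Chars.find rest sep).toNat with hj'
  have : j' = j := by
    by_contra hne
    rcases Nat.lt_or_ge j' j with hlt | hge
    · exact hmin (j'+1) (by omega) (by rw [List.drop_succ_cons]; exact hpre')
    · exact hmin' j (by omega) hpre
  omega

theorem spChar_of_find_nonneg (sep : List Char) (hsep : sep ≠ []) :
    ∀ (j : Nat) (l : List Char), PySem.Chars.find l sep = (j : Int) →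
      spChar sep l = l.take j :: spChar sep (l.drop (j + sep.length)) := by
  intro j
  induction j with
  | zero =>
    intro l hf
    obtain ⟨hpre, -⟩ := PySem.Chars.find_spec (by rw [hf]; exact le_refl _)
    rw [hf] at hpre; simp at hpre
    cases l with
    | nil => exact absurd (List.prefix_nil.mp hpre) hsep
    | cons c rest =>
      rw [spChar, if_pos (List.isPrefixOf_iff_prefix.mpr hpre)]
      have hL : 1 ≤ sep.length := by cases sep <;> simp_all
      congr 1
      · congr 1
        cases hL' : sep.length with
        | zero => omega
        | succ k => simp [List.drop_succ_cons]
  | succ j ih =>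
    intro l hf
    have h0 : (0:Int) ≤ PySem.Chars.find l sep := by rw [hf]; positivity
    obtain ⟨hpre, hmin⟩ := PySem.Chars.find_spec h0
    rw [hf] at hpre hmin
    have hnp : ¬ sep.isPrefixOf l = true := by
      intro hp
      exact hmin 0 (by omega) (by simpa using List.isPrefixOf_iff_prefix.mp hp)
    cases l with
    | nil =>
      exfalso
      have : sep <+: [] := by simpa using hpre
      exact hsep (List.prefix_nil.mp this)
    | cons c rest =>
      have hr : PySem.Chars.find rest sep = (j : Int) := by
        apply find_cons_succ sep c rest j
        rw [hf]; push_cast; ring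
      rw [spChar, if_neg hnp, ih rest hr]
      simp [List.modifyHead, List.take_succ_cons]
      have : j + 1 + sep.length = (j + sep.length) + 1 := by omega
      rw [this, List.drop_succ_cons]

-- render a piece list as both programs' output
def renderPieces (substr : String) (P : List (List Char)) : List (String × String) :=
  (P.dropLast.map (fun g => (String.ofList g, substr))) ++ [(String.ofList (P.getLastD []), "")]

theorem slice_zero_self (substr : String) : PySem.Str.slice substr none (some 0) = "" := by
  rw [PySem.Str.slice]
  rw [PySem.Chars.slice, PySem.List.slice_to _ (by omega : (0:Int) ≤ 0)]
  simp [String.ofList]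
  rfl

theorem renderPieces_cons (substr : String) (p : List Char) (ps : List (List Char)) (h : ps ≠ []) :
    renderPieces substr (p :: ps) = (String.ofList p, substr) :: renderPieces substr ps := by
  cases ps with
  | nil => exact absurd rfl h
  | cons q qs => simp [renderPieces, List.dropLast_cons_of_ne_nil]

theorem loopA_eq_render (substr s : String) (hsep : substr.toList ≠ []) (fuel : Nat) :
    ∀ i : Nat, i ≤ s.toList.length → s.toList.length - i < fuel →
    iterSplitLoopA substr s substr.toList.length fuel i
      = renderPieces substr (spChar substr.toList (s.toList.drop i)) := by
  induction fuel with
  | zero => intro i hi hf; omega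
  | succ fuel ih =>
    intro i hi hf
    have hL : 1 ≤ substr.toList.length := by cases h : substr.toList <;> simp_all
    rw [iterSplitLoopA]
    simp only [PySem.Str.findFrom]
    rw [PySem.Chars.findFrom_natCast _ _ i hi]
    by_cases hneg : PySem.Chars.find (s.toList.drop i) substr.toList = -1
    · rw [if_pos (by rw [hneg]; simp)]
      rw [spChar_of_find_neg _ _ hneg]
      rw [renderPieces, slice_zero_self]
      simp [PySem.Str.slice, PySem.Chars.slice, PySem.List.slice_from _ (by positivity : (0:Int) ≤ (i:Int))]
    · rw [if_neg hneg]
      have h0 : 0 ≤ PySem.Chars.find (s.toList.drop i) substr.toList := by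
        have h1 := PySem.Chars.neg_one_le_find (s.toList.drop i) substr.toList
        omega
      set f := (PySem.Chars.find (s.toList.drop i) substr.toList).toNat with hfdef
      have hfind : PySem.Chars.find (s.toList.drop i) substr.toList = (f : Int) := by omega
      obtain ⟨hpre, -⟩ := PySem.Chars.find_spec h0
      rw [hfind]
      rw [if_neg (by omega)]
      have hbound : i + f + substr.toList.length ≤ s.toList.length := by
        have hlen := hpre.length_le
        rw [List.length_drop, List.length_drop] at hlen
        omega
      rw [spChar_of_find_nonneg _ hsep f _ hfind]
      rw [renderPieces_cons _ _ _ (spChar_ne_nil _ _)]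
      have harg : ((i : Int) + (f:Int)).toNat + substr.toList.length = i + f + substr.toList.length := by omega
      rw [harg, ih (i + f + substr.toList.length) hbound (by omega)]
      rw [List.drop_drop]
      have hidx : i + (f + substr.toList.length) = i + f + substr.toList.length := by omega
      rw [hidx]
      have hcast : (i:Int) + (f:Int) = ((i + f : Nat) : Int) := by push_cast; ring
      rw [hcast, PySem.Str.slice, PySem.Chars.slice, PySem.List.slice_natCast]
      rw [Nat.add_sub_cancel_left]

theorem pyGet_neg_one_getD {α : Type} (xs : List α) (d : α) :
    (PySem.List.pyGet? xs (-1)).getD d = xs.getLastD d := by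
  cases xs with
  | nil => simp [PySem.List.pyGet?, PySem.List.pyIdx?]
  | cons a l =>
    simp [PySem.List.pyGet?, PySem.List.pyIdx?]
    simp [List.getLast?_eq_getElem?]

theorem getLastD_map_ofList (P : List (List Char)) (h : P ≠ []) :
    (P.map String.ofList).getLastD "" = String.ofList (P.getLastD []) := by
  rw [List.getLastD_eq_getLast?, List.getLastD_eq_getLast?, List.getLast?_map]
  cases hx : P.getLast? with
  | none => simp [List.getLast?_eq_none_iff] at hx; exact absurd hx h
  | some x => simp

theorem alt_eq_render (substr s : String) (hsep : substr.toList ≠ []) :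
    iter_split_ex_by__alt substr s = renderPieces substr (spChar substr.toList s.toList) := by
  have hlen : PySem.Str.len substr ≠ 0 := by
    rw [PySem.Str.len]
    simp only [ne_eq, Nat.cast_eq_zero, List.length_eq_zero_iff]
    exact hsep
  rw [iter_split_ex_by__alt, if_neg hlen]
  rw [PySem.Str.split?, PySem.Chars.split?]
  rw [if_neg (by simpa [List.isEmpty_iff] using hsep)]
  simp only [Option.map_some]
  rw [splitOn_eq_spChar _ _ hsep]
  rw [PySem.List.slice_to_neg_one, pyGet_neg_one_getD]
  rw [getLastD_map_ofList _ (spChar_ne_nil _ _)]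
  rw [← List.map_dropLast, List.map_map, slice_zero_self]
  rfl

-- ===== VERDICT (by name: the statement is the Claim_ definition above) =====
theorem iter_split_ex_by__spec : Claim_equal_iter_split_ex_by_ := by
  intro substr s hdom hpre
  unfold Spec_iter_split_ex_by_
  have hsep : substr.toList ≠ [] := by simpa using hpre
  have hlen : PySem.Str.len substr ≠ 0 := by
    rw [PySem.Str.len]
    simp only [ne_eq, Nat.cast_eq_zero, List.length_eq_zero_iff]
    exact hsep
  rw [iter_split_ex_by_, if_neg hlen, alt_eq_render _ _ hsep]
  have hL : (PySem.Str.len substr).toNat = substr.toList.length := by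
    rw [PySem.Str.len]; omega
  rw [hL, loopA_eq_render substr s hsep (s.toList.length + 1) 0 (by omega) (by omega)]
  simp
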